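-- pv_equiv track=rewrite | github.com/bkolar18/The-Wedding-Concierge | backend/services/scraper/scraper.py | _get_known_subpages
-- ===== SOURCE A (Python) =====
-- from typing import Dict, Any, Optional, List
--
-- def _get_known_subpages(url: str, platform: str) -> List[str]:
--     """Generate URLs for known subpages based on platform patterns.
--
--     This is a fallback when _find_subpages() can't detect navigation
--     (e.g., when navigation is rendered by JavaScript).
--     """
--     base_url = url.rstrip("/")
--
--     if platform == "the_knot":
--         # The Knot pattern: /us/couple-name/section
--         sections = ["travel", "q-a", "schedule", "registry", "rsvp", "party", "photos"]
--         return [f"{base_url}/{section}" for section in sections]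
--     elif platform == "zola":
--         sections = ["travel", "faq", "schedule", "registry"]
--         return [f"{base_url}/{section}" for section in sections]
--     elif platform == "joy":
--         sections = ["travel", "faq", "schedule", "registry", "story"]
--         return [f"{base_url}/{section}" for section in sections]
--     elif platform == "weddingwire":
--         sections = ["events", "travel", "accommodations", "q-a", "schedule", "registry"]
--         return [f"{base_url}/{section}" for section in sections]
--
--     return []
-- ===== SOURCE B (Python) =====
-- from typing import List
--
-- # Inverted index: one master ordered list of sections, each tagged with the
-- # platforms whose site has that section.  A platform's URL list is the master
-- # list filtered by membership, in master order.
-- _SECTION_PLATFORMS = [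
--     ("events", {"weddingwire"}),
--     ("travel", {"the_knot", "zola", "joy", "weddingwire"}),
--     ("accommodations", {"weddingwire"}),
--     ("q-a", {"the_knot", "weddingwire"}),
--     ("faq", {"zola", "joy"}),
--     ("schedule", {"the_knot", "zola", "joy", "weddingwire"}),
--     ("registry", {"the_knot", "zola", "joy", "weddingwire"}),
--     ("rsvp", {"the_knot"}),
--     ("party", {"the_knot"}),
--     ("photos", {"the_knot"}),
--     ("story", {"joy"}),
-- ]
--
-- def _get_known_subpages(url: str, platform: str) -> List[str]:
--     base_url = url.rstrip("/")
--     return [f"{base_url}/{section}"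
--             for section, platforms in _SECTION_PLATFORMS
--             if platform in platforms]
-- ===== Notes on version B (the rewrite author's own statement) =====
-- stated objective: alternative
-- what changed: Inverts the data: instead of branching per platform to a platform-specific section list, B keeps one master ordered list of (section, platforms-that-have-it) pairs and makes a single filtering pass over it, emitting a URL whenever the platform belongs to the section's tag set; unknown platforms filter everything out.
import Mathlib
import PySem

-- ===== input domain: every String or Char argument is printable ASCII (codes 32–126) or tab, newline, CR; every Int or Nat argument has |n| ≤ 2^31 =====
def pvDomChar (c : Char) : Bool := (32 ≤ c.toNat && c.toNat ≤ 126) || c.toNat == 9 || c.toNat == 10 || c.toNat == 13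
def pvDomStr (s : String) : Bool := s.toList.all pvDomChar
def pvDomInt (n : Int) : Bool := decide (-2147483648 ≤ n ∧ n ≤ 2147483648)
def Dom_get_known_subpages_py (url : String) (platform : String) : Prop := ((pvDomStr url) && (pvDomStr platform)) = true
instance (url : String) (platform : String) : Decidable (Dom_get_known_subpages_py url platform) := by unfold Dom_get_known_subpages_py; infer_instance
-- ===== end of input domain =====

-- B inverts the data: one master ordered list of (section, platforms) pairs filtered in a
-- single pass by platform membership, instead of A's per-platform branch with its own list.

-- url.rstrip("/"): ported by hand (PySem has no rstrip-with-argument); exact — Python's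
-- rstrip("/") removes exactly the trailing '/' characters.
def pvRstripSlash (s : String) : String :=
  String.ofList ((s.toList.reverse.dropWhile (· == '/')).reverse)

-- ===== PORT A =====
def get_known_subpages_py (url : String) (platform : String) : List String :=
  let base_url := pvRstripSlash url
  if platform == "the_knot" then
    let sections := ["travel", "q-a", "schedule", "registry", "rsvp", "party", "photos"]
    sections.map (fun sec => base_url ++ "/" ++ sec)
  else if platform == "zola" then
    let sections := ["travel", "faq", "schedule", "registry"]
    sections.map (fun sec => base_url ++ "/" ++ sec)
  else if platform == "joy" then
    let sections := ["travel", "faq", "schedule", "registry", "story"]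
    sections.map (fun sec => base_url ++ "/" ++ sec)
  else if platform == "weddingwire" then
    let sections := ["events", "travel", "accommodations", "q-a", "schedule", "registry"]
    sections.map (fun sec => base_url ++ "/" ++ sec)
  else
    []

-- ===== PORT B =====
-- Python sets of string literals → PySem.Set String (distinct elements).
def pvSectionPlatforms : List (String × PySem.Set String) :=
  [ ("events", PySem.Set.ofList ["weddingwire"]),
    ("travel", PySem.Set.ofList ["the_knot", "zola", "joy", "weddingwire"]),
    ("accommodations", PySem.Set.ofList ["weddingwire"]),
    ("q-a", PySem.Set.ofList ["the_knot", "weddingwire"]),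
    ("faq", PySem.Set.ofList ["zola", "joy"]),
    ("schedule", PySem.Set.ofList ["the_knot", "zola", "joy", "weddingwire"]),
    ("registry", PySem.Set.ofList ["the_knot", "zola", "joy", "weddingwire"]),
    ("rsvp", PySem.Set.ofList ["the_knot"]),
    ("party", PySem.Set.ofList ["the_knot"]),
    ("photos", PySem.Set.ofList ["the_knot"]),
    ("story", PySem.Set.ofList ["joy"]) ]

def get_known_subpages_py_alt (url : String) (platform : String) : List String :=
  let base_url := pvRstripSlash url
  pvSectionPlatforms.filterMap (fun p =>
    if p.2.contains platform then some (base_url ++ "/" ++ p.1) else none)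

-- ===== PRECONDITION & SPEC =====
def Spec_get_known_subpages_py (url : String) (platform : String) (out : List String) : Prop := out = get_known_subpages_py_alt url platform
instance (url : String) (platform : String) (out : List String) : Decidable (Spec_get_known_subpages_py url platform out) := by unfold Spec_get_known_subpages_py; infer_instance

-- ===== CLAIM =====
def Claim_equal_get_known_subpages_py : Prop := ∀ (url : String) (platform : String), Dom_get_known_subpages_py url platform → Spec_get_known_subpages_py url platform (get_known_subpages_py url platform)

-- ===== LEMMAS AND PROOFS =====
theorem pvFilter_eval (url platform : String) :
    get_known_subpages_py_alt url platform =
      let base_url := pvRstripSlash url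
      if platform == "the_knot" then
        ["travel", "q-a", "schedule", "registry", "rsvp", "party", "photos"].map (fun sec => base_url ++ "/" ++ sec)
      else if platform == "zola" then
        ["travel", "faq", "schedule", "registry"].map (fun sec => base_url ++ "/" ++ sec)
      else if platform == "joy" then
        ["travel", "faq", "schedule", "registry", "story"].map (fun sec => base_url ++ "/" ++ sec)
      else if platform == "weddingwire" then
        ["events", "travel", "accommodations", "q-a", "schedule", "registry"].map (fun sec => base_url ++ "/" ++ sec)
      else [] := by
  by_cases h1 : platform = "the_knot"
  · subst h1; rfl
  by_cases h2 : platform = "zola"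
  · subst h2; rfl
  by_cases h3 : platform = "joy"
  · subst h3; rfl
  by_cases h4 : platform = "weddingwire"
  · subst h4; rfl
  have hc : ∀ (s : PySem.Set String) (x : String), s.contains x = List.contains s x := fun _ _ => rfl
  simp [get_known_subpages_py_alt, pvSectionPlatforms, PySem.Set.ofList, PySem.Set.add,
    PySem.Set.empty, hc, List.filterMap, h1, h2, h3, h4, Ne.symm h1, Ne.symm h2, Ne.symm h3, Ne.symm h4]

-- ===== VERDICT =====
theorem get_known_subpages_py_spec : Claim_equal_get_known_subpages_py := by
  intro url platform _
  unfold Spec_get_known_subpages_py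
  rw [pvFilter_eval]
  unfold get_known_subpages_py
  split_ifs <;> rfl
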